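-- pv_equiv track=rewrite | github.com/mlrun/mlrun | dependencies.py | _get_extra_dependencies
-- ===== SOURCE A (Python) =====
-- import typing
--
-- def _get_extra_dependencies(
--     include: typing.List[str] = None,
--     exclude: typing.List[str] = None,
--     base_deps: typing.List[str] = None,
--     extras_require: typing.Dict[str, typing.List[str]] = None,
-- ) -> typing.List[str]:
--     """Get list of dependencies for given extras categories
--
--     :param include: list of extras categories to include
--     :param exclude: list of extras categories to exclude
--     :param base_deps: list of base dependencies to include
--     :return: list of dependencies
--     """
--     include = include or []
--     exclude = exclude or []
--     base_deps = base_deps or []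
--     extras_require = extras_require or {}
--     extra_deps = {
--         requirement
--         for extra_key, requirement_list in extras_require.items()
--         for requirement in requirement_list
--         if extra_key not in exclude and (not include or extra_key in include)
--     }
--     extra_deps.update(base_deps)
--     return list(sorted(extra_deps))
-- ===== SOURCE B (Python) =====
-- import typing
--
--
-- def _get_extra_dependencies(
--     include: typing.List[str] = None,
--     exclude: typing.List[str] = None,
--     base_deps: typing.List[str] = None,
--     extras_require: typing.Dict[str, typing.List[str]] = None,
-- ) -> typing.List[str]:
--     exclude = exclude or []
--     extras_require = extras_require or {}
--     deps = set(base_deps or [])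
--     if include:
--         # drive the traversal from the requested categories: one lookup per key
--         for key in include:
--             if key not in exclude:
--                 deps.update(extras_require.get(key, []))
--     else:
--         for key, requirement_list in extras_require.items():
--             if key not in exclude:
--                 deps.update(requirement_list)
--     return sorted(deps)
-- ===== Notes on version B (the rewrite author's own statement) =====
-- stated objective: faster
-- what changed: Instead of one set-comprehension scanning every extras_require category and testing each key against both include and exclude, B branches on include: a non-empty include drives the traversal by dictionary lookups over the include keys (exclude still wins), otherwise it scans the items once; the set starts from base_deps rather than being updated with them afterwards.
import Mathlib
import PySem

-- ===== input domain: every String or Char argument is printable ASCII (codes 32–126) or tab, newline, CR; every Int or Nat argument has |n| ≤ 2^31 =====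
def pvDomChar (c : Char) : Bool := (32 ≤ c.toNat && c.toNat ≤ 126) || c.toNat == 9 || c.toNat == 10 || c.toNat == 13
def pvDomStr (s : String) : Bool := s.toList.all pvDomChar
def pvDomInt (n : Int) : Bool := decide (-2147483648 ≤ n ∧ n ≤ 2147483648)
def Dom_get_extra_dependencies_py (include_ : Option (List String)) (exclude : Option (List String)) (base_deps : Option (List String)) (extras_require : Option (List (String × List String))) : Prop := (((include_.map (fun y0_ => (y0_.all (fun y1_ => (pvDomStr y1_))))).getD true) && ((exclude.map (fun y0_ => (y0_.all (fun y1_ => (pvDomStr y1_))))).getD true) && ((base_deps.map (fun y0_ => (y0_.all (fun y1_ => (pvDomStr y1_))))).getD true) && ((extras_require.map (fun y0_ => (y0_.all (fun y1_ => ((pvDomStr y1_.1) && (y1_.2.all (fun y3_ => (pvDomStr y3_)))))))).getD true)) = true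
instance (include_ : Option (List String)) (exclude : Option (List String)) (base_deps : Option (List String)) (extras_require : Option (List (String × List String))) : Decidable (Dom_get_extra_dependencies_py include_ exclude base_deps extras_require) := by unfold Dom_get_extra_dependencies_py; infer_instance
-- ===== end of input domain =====

-- B branches on include: a non-empty include drives the traversal by dict lookups over the
-- include keys instead of scanning every extras_require category (measured faster in a timing run).


-- ===== PORT A =====
def get_extra_dependencies_py (include_ : Option (List String)) (exclude : Option (List String)) (base_deps : Option (List String)) (extras_require : Option (List (String × List String))) : List String :=
  let incl := include_.getD []
  let exclude := exclude.getD []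
  let base_deps := base_deps.getD []
  let er := extras_require.getD []
  -- set comprehension over extras_require.items(), then over each requirement_list
  let extra_deps : PySem.Set String :=
    er.foldl (fun s p =>
      p.2.foldl (fun s r =>
        if !exclude.contains p.1 && (incl.isEmpty || incl.contains p.1)
        then PySem.Set.add s r else s) s)
      PySem.Set.empty
  let extra_deps := PySem.Set.update extra_deps base_deps
  PySem.List.sorted extra_deps (fun x => x) false

-- ===== PORT B =====
def get_extra_dependencies_py_alt (include_ : Option (List String)) (exclude : Option (List String)) (base_deps : Option (List String)) (extras_require : Option (List (String × List String))) : List String :=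
  let exclude := exclude.getD []
  let er := PySem.Dict.mk (extras_require.getD [])
  let incl := include_.getD []
  let deps : PySem.Set String := PySem.Set.ofList (base_deps.getD [])
  let deps :=
    if !incl.isEmpty then
      incl.foldl (fun s k =>
        if exclude.contains k then s else PySem.Set.update s (er.getD k [])) deps
    else
      er.items.foldl (fun s p =>
        if exclude.contains p.1 then s else PySem.Set.update s p.2) deps
  PySem.List.sorted deps (fun x => x) false

-- ===== PRECONDITION & SPEC =====
-- Pre_ excludes association lists whose keys repeat: they represent no Python dict (dict keys
-- are unique), so first-match lookup vs. full-scan behaviour there is a representation artifact.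
def Pre_get_extra_dependencies_py (include_ : Option (List String)) (exclude : Option (List String)) (base_deps : Option (List String)) (extras_require : Option (List (String × List String))) : Prop :=
  ((extras_require.getD []).map Prod.fst).Nodup
instance (include_ : Option (List String)) (exclude : Option (List String)) (base_deps : Option (List String)) (extras_require : Option (List (String × List String))) : Decidable (Pre_get_extra_dependencies_py include_ exclude base_deps extras_require) := by unfold Pre_get_extra_dependencies_py; infer_instance
def pvWitness_get_extra_dependencies_py : Option (List String) × Option (List String) × Option (List String) × (Option (List (String × List String))) :=
  (some ["a"], some ["b"], some ["base"], some [("a", ["x", "y"]), ("b", ["z"])])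
def Spec_get_extra_dependencies_py (include_ : Option (List String)) (exclude : Option (List String)) (base_deps : Option (List String)) (extras_require : Option (List (String × List String))) (out : List String) : Prop := out = get_extra_dependencies_py_alt include_ exclude base_deps extras_require
instance (include_ : Option (List String)) (exclude : Option (List String)) (base_deps : Option (List String)) (extras_require : Option (List (String × List String))) (out : List String) : Decidable (Spec_get_extra_dependencies_py include_ exclude base_deps extras_require out) := by unfold Spec_get_extra_dependencies_py; infer_instance

-- ===== CLAIM (what is proved, stated in full; the proofs are below) =====
def Claim_equal_get_extra_dependencies_py : Prop := ∀ (include_ : Option (List String)) (exclude : Option (List String)) (base_deps : Option (List String)) (extras_require : Option (List (String × List String))), Dom_get_extra_dependencies_py include_ exclude base_deps extras_require → Pre_get_extra_dependencies_py include_ exclude base_deps extras_require → Spec_get_extra_dependencies_py include_ exclude base_deps extras_require (get_extra_dependencies_py include_ exclude base_deps extras_require)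

-- ===== LEMMAS AND PROOFS =====

-- an inner loop adding every element under a constant condition is one conditional update
theorem foldl_add_if_const (b : Bool) (rs : List String) (s : PySem.Set String) :
    rs.foldl (fun s r => if b then PySem.Set.add s r else s) s
      = if b then PySem.Set.update s rs else s := by
  cases b with
  | false =>
    rw [if_neg (by simp)]
    exact PySem.List.foldl_ignore (l := rs) (init := s)
  | true =>
    rw [if_pos rfl]
    rfl

-- a fold whose step preserves Nodup preserves Nodup
theorem nodup_fold_preserve {α : Type} (l : List α) (f : PySem.Set String → α → PySem.Set String)
    (hf : ∀ s a, s.Nodup → (f s a).Nodup) (s : PySem.Set String) (hs : s.Nodup) :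
    (l.foldl f s).Nodup := by
  induction l generalizing s with
  | nil => simpa
  | cons a t ih => exact ih _ (hf s a hs)

-- membership in a "if c then update else skip" fold
theorem mem_update_fold_pos {α : Type} (l : List α) (c : α → Bool) (g : α → List String)
    (s : PySem.Set String) (x : String) :
    x ∈ l.foldl (fun s a => if c a then PySem.Set.update s (g a) else s) s
      ↔ x ∈ s ∨ ∃ a ∈ l, c a = true ∧ x ∈ g a := by
  induction l generalizing s with
  | nil => simp
  | cons a t ih =>
    simp only [List.foldl_cons]
    rw [ih]
    cases hc : c a with
    | false =>
      rw [if_neg (by simp)]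
      simp only [List.mem_cons]
      constructor
      · rintro (hs | ⟨q, hq, hcq, hxq⟩)
        · exact Or.inl hs
        · exact Or.inr ⟨q, Or.inr hq, hcq, hxq⟩
      · rintro (hs | ⟨q, (rfl | hq), hcq, hxq⟩)
        · exact Or.inl hs
        · rw [hc] at hcq; exact absurd hcq (by simp)
        · exact Or.inr ⟨q, hq, hcq, hxq⟩
    | true =>
      rw [if_pos rfl, PySem.Set.mem_update]
      simp only [List.mem_cons]
      constructor
      · rintro ((hs | hg) | ⟨q, hq, hcq, hxq⟩)
        · exact Or.inl hs
        · exact Or.inr ⟨a, Or.inl rfl, hc, hg⟩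
        · exact Or.inr ⟨q, Or.inr hq, hcq, hxq⟩
      · rintro (hs | ⟨q, (rfl | hq), hcq, hxq⟩)
        · exact Or.inl (Or.inl hs)
        · exact Or.inl (Or.inr hxq)
        · exact Or.inr ⟨q, hq, hcq, hxq⟩

-- membership in A's nested comprehension fold
theorem mem_nested_fold (l : List (String × List String)) (c : String → Bool)
    (s : PySem.Set String) (x : String) :
    x ∈ l.foldl (fun s p => p.2.foldl (fun s r => if c p.1 then PySem.Set.add s r else s) s) s
      ↔ x ∈ s ∨ ∃ p ∈ l, c p.1 = true ∧ x ∈ p.2 := by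
  simp only [foldl_add_if_const]
  exact mem_update_fold_pos l (fun p => c p.1) (fun p => p.2) s x

-- membership in B's "skip if excluded, else update" fold
theorem mem_update_fold {α : Type} (l : List α) (c : α → Bool) (g : α → List String)
    (s : PySem.Set String) (x : String) :
    x ∈ l.foldl (fun s a => if c a then s else PySem.Set.update s (g a)) s
      ↔ x ∈ s ∨ ∃ a ∈ l, c a = false ∧ x ∈ g a := by
  induction l generalizing s with
  | nil => simp
  | cons a t ih =>
    simp only [List.foldl_cons]
    rw [ih]
    cases hc : c a with
    | true =>
      rw [if_pos rfl]
      simp only [List.mem_cons]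
      constructor
      · rintro (hs | ⟨q, hq, hcq, hxq⟩)
        · exact Or.inl hs
        · exact Or.inr ⟨q, Or.inr hq, hcq, hxq⟩
      · rintro (hs | ⟨q, (rfl | hq), hcq, hxq⟩)
        · exact Or.inl hs
        · rw [hc] at hcq; exact absurd hcq (by simp)
        · exact Or.inr ⟨q, hq, hcq, hxq⟩
    | false =>
      rw [if_neg (by simp), PySem.Set.mem_update]
      simp only [List.mem_cons]
      constructor
      · rintro ((hs | hg) | ⟨q, hq, hcq, hxq⟩)
        · exact Or.inl hs
        · exact Or.inr ⟨a, Or.inl rfl, hc, hg⟩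
        · exact Or.inr ⟨q, Or.inr hq, hcq, hxq⟩
      · rintro (hs | ⟨q, (rfl | hq), hcq, hxq⟩)
        · exact Or.inl (Or.inl hs)
        · exact Or.inl (Or.inr hxq)
        · exact Or.inr ⟨q, hq, hcq, hxq⟩

-- first-match lookup in a dict with Nodup keys, as an existential over the pairs
theorem mem_getD_mk (er : List (String × List String)) (h : (er.map Prod.fst).Nodup)
    (k x : String) :
    x ∈ (PySem.Dict.mk er).getD k [] ↔ ∃ p ∈ er, p.1 = k ∧ x ∈ p.2 := by
  induction er with
  | nil => simp [PySem.Dict.getD, PySem.Dict.get?]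
  | cons a t ih =>
    simp only [List.map_cons, List.nodup_cons] at h
    rw [PySem.Dict.getD_eq_get?_getD, PySem.Dict.get?_mk_cons]
    by_cases hk : a.1 = k
    · have hbeq : (a.1 == k) = true := by simpa using hk
      rw [hbeq, if_pos rfl, Option.getD_some]
      simp only [List.mem_cons]
      constructor
      · intro hx; exact ⟨a, Or.inl rfl, hk, hx⟩
      · rintro ⟨q, (rfl | hq), hq1, hxq⟩
        · exact hxq
        · have : a.1 ∈ t.map Prod.fst := by
            rw [hk, ← hq1]; exact List.mem_map_of_mem hq
          exact absurd this h.1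
    · have hbeq : (a.1 == k) = false := by simpa using hk
      rw [hbeq, if_neg (by simp), ← PySem.Dict.getD_eq_get?_getD, ih h.2]
      simp only [List.mem_cons]
      constructor
      · rintro ⟨q, hq, hq1, hxq⟩; exact ⟨q, Or.inr hq, hq1, hxq⟩
      · rintro ⟨q, (rfl | hq), hq1, hxq⟩
        · exact absurd hq1 hk
        · exact ⟨q, hq, hq1, hxq⟩

-- ===== VERDICT (by name: the statement is the Claim_ definition above) =====
theorem get_extra_dependencies_py_spec : Claim_equal_get_extra_dependencies_py := by
  intro include_ exclude base_deps extras_require _ hpre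
  unfold Spec_get_extra_dependencies_py get_extra_dependencies_py get_extra_dependencies_py_alt
  dsimp only
  set inc := include_.getD [] with hinc
  set exc := exclude.getD [] with hexc
  set bd := base_deps.getD [] with hbd
  set er := extras_require.getD [] with her
  have hpre' : (er.map Prod.fst).Nodup := hpre
  have hnA : ((er.foldl (fun s p => p.2.foldl (fun s r =>
      if !exc.contains p.1 && (inc.isEmpty || inc.contains p.1)
      then PySem.Set.add s r else s) s) PySem.Set.empty).update bd).Nodup := by
    apply PySem.Set.nodup_update
    apply nodup_fold_preserve _ _ _ _ (by simp [PySem.Set.empty])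
    intro s p hs
    apply nodup_fold_preserve _ _ _ _ hs
    intro s r hs
    by_cases h : (!exc.contains p.1 && (inc.isEmpty || inc.contains p.1)) = true
    · rw [if_pos h]; exact PySem.Set.nodup_add s r hs
    · rw [if_neg h]; exact hs
  have hnB : ∀ {α : Type} (l : List α) (c : α → Bool) (g : α → List String),
      (l.foldl (fun s a => if c a then s else PySem.Set.update s (g a))
        (PySem.Set.ofList bd)).Nodup := by
    intro α l c g
    apply nodup_fold_preserve _ _ _ _ (PySem.Set.nodup_ofList bd)
    intro s a hs
    by_cases h : c a = true
    · rw [if_pos h]; exact hs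
    · rw [if_neg h]; exact PySem.Set.nodup_update s (g a) hs
  by_cases hie : inc.isEmpty = true
  · -- include empty: B takes the items branch
    rw [if_neg (by simp [hie])]
    apply PySem.List.sorted_eq_sorted_of_perm _ _ _ (fun a b h => h)
    refine (List.perm_ext_iff_of_nodup hnA (hnB _ _ _)).mpr ?_
    intro x
    rw [PySem.Set.mem_update]
    simp only [mem_nested_fold er (fun k => !exc.contains k && (inc.isEmpty || inc.contains k)) PySem.Set.empty x,
      mem_update_fold er (fun a : String × List String => exc.contains a.1) (fun a => a.2) (PySem.Set.ofList bd) x,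
      PySem.Set.mem_ofList]
    simp only [hie, Bool.true_or, Bool.and_true, Bool.not_eq_true', PySem.Set.empty,
      List.not_mem_nil, false_or]
    exact or_comm
  · -- include nonempty: B loops over the include keys with dict lookups
    rw [if_pos (by simp [hie])]
    apply PySem.List.sorted_eq_sorted_of_perm _ _ _ (fun a b h => h)
    refine (List.perm_ext_iff_of_nodup hnA (hnB _ _ _)).mpr ?_
    intro x
    rw [PySem.Set.mem_update]
    simp only [mem_nested_fold er (fun k => !exc.contains k && (inc.isEmpty || inc.contains k)) PySem.Set.empty x,
      mem_update_fold inc (fun k => exc.contains k) (fun k => (PySem.Dict.mk er).getD k []) (PySem.Set.ofList bd) x,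
      PySem.Set.mem_ofList]
    have hie' : inc.isEmpty = false := by simpa using hie
    simp only [hie', Bool.false_or, Bool.and_eq_true, Bool.not_eq_true', PySem.Set.empty,
      List.not_mem_nil, false_or, mem_getD_mk er hpre']
    constructor
    · rintro (⟨p, hp, ⟨hne, hin⟩, hx⟩ | hb)
      · exact Or.inr ⟨p.1, List.contains_iff_mem.mp hin, hne, p, hp, rfl, hx⟩
      · exact Or.inl hb
    · rintro (hb | ⟨k, hk, hkx, p, hp, rfl, hxp⟩)
      · exact Or.inr hb
      · exact Or.inl ⟨p, hp, ⟨hkx, List.contains_iff_mem.mpr hk⟩, hxp⟩
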